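-- pv_equiv track=rewrite | github.com/ilmari99/algorithms | foobar42_bounces.py | is_bounce_seq
-- ===== SOURCE A (Python) =====
-- def is_bounce_seq(seq):
--     """Goes through the sequence and checks if it is a bounce sequence.
--     Checks if there are impossible subsequences, such that a bounce occurs twice in the same wall,
--     without first having been bounced from he opposite wall back.
--
--     Args:
--         seq (tuple): bounce sequence to check
--
--     Returns:
--         bool: True if the sequence is a bounce sequence, False otherwise
--     """
--     for i,b in enumerate(seq):
--         for r in seq[i+1:]: # TODO: maybe only check the next 3 of the sequence
--             if abs(b-r) == 2:
--                 break
--             if r == b: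
--                 return False
--     return True
-- ===== SOURCE B (Python) =====
-- def is_bounce_seq(seq):
--     # One right-to-left pass keeping, for each value, the index of its nearest
--     # occurrence to the right; a bounce repeats illegally iff the nearest equal
--     # value comes before the nearest value at distance 2.
--     nxt = {}
--     for i, b in reversed(list(enumerate(seq))):
--         e = nxt.get(b)
--         if e is not None:
--             p = nxt.get(b - 2)
--             q = nxt.get(b + 2)
--             if p is None and q is None:
--                 return False
--             w = p if q is None else (q if p is None else min(p, q))
--             if e < w:
--                 return False
--         nxt[b] = i
--     return True
-- ===== Notes on version B (the rewrite author's own statement) =====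
-- stated objective: faster
-- what changed: Replaced the quadratic nested scan with a single right-to-left pass maintaining a dict of the nearest next index per value, deciding each position by comparing the nearest equal index with the nearest distance-2 index.
import Mathlib
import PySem

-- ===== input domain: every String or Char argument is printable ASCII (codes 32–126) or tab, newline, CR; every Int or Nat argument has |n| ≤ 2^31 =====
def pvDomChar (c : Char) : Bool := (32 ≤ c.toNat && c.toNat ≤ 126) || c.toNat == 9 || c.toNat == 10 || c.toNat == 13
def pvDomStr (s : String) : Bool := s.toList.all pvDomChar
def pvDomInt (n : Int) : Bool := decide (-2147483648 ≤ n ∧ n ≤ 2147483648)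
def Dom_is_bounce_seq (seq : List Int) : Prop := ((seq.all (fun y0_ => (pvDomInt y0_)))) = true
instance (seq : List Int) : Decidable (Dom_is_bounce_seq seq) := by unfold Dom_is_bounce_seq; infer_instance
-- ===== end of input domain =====

-- B replaces A's quadratic nested scan by one right-to-left pass with a dict of
-- nearest-next index per value (objective: faster, asymptotically).

-- ===== PORT A =====
-- inner loop 'for r in seq[i+1:]': returns true iff it hits 'return False'
def pvInnerA (b : Int) : List Int → Bool
  | [] => false
  | r :: rs => if (b - r).natAbs = 2 then false else if r = b then true else pvInnerA b rs

-- outer loop 'for i,b in enumerate(seq)': at step i the slice seq[i+1:] is the tail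
def is_bounce_seq : List Int → Bool
  | [] => true
  | b :: rest => if pvInnerA b rest then false else is_bounce_seq rest

-- ===== PORT B =====
-- 'for i, b in reversed(list(enumerate(seq)))' with dict nxt of nearest next index
def pvGoB : List (Int × Int) → PySem.Dict Int Int → Bool
  | [], _ => true
  | (i, b) :: rest, d =>
    match d.get? b with
    | none => pvGoB rest (d.insert b i)
    | some e =>
      match d.get? (b - 2), d.get? (b + 2) with
      | none, none => false
      | some p, none => if e < p then false else pvGoB rest (d.insert b i)
      | none, some q => if e < q then false else pvGoB rest (d.insert b i)
      | some p, some q => if e < min p q then false else pvGoB rest (d.insert b i)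

def is_bounce_seq_alt (seq : List Int) : Bool :=
  pvGoB (PySem.List.enumerate seq 0).reverse PySem.Dict.empty

-- ===== PRECONDITION & SPEC =====
def Spec_is_bounce_seq (seq : List Int) (out : Bool) : Prop := out = is_bounce_seq_alt seq
instance (seq : List Int) (out : Bool) : Decidable (Spec_is_bounce_seq seq out) := by unfold Spec_is_bounce_seq; infer_instance

-- ===== CLAIM (what is proved, stated in full; the proofs are below) =====
def Claim_equal_is_bounce_seq : Prop := ∀ (seq : List Int), Dom_is_bounce_seq seq → Spec_is_bounce_seq seq (is_bounce_seq seq)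

-- ===== LEMMAS AND PROOFS =====

-- the dict built by pvGoB's inserts
def pvDa (l : List (Int × Int)) (d : PySem.Dict Int Int) : PySem.Dict Int Int :=
  l.foldl (fun d p => d.insert p.2 p.1) d

-- abstract form of B's per-element decision, over positions
def pvDecode (e p q : Option Nat) : Bool :=
  match e with
  | none => false
  | some j =>
    match p, q with
    | none, none => true
    | some k, none => decide (j < k)
    | none, some k => decide (j < k)
    | some k, some l => decide (j < min k l)

lemma pvGoB_append (l1 l2 : List (Int × Int)) (d : PySem.Dict Int Int) :
    pvGoB (l1 ++ l2) d = (pvGoB l1 d && pvGoB l2 (pvDa l1 d)) := by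
  induction l1 generalizing d with
  | nil => simp [pvGoB, pvDa]
  | cons hd tl ih =>
    obtain ⟨i, b⟩ := hd
    have hda : pvDa ((i, b) :: tl) d = pvDa tl (d.insert b i) := rfl
    simp only [List.cons_append, pvGoB, hda]
    cases h : d.get? b with
    | none => exact ih _
    | some e =>
      cases hp : d.get? (b - 2) with
      | none =>
        cases hq : d.get? (b + 2) with
        | none => simp
        | some q =>
          by_cases heq : e < q
          · simp [heq]
          · simp only [if_neg heq]; exact ih _
      | some p =>
        cases hq : d.get? (b + 2) with
        | none =>
          by_cases hep : e < p
          · simp [hep]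
          · simp only [if_neg hep]; exact ih _
        | some q =>
          by_cases hm : e < min p q
          · simp [hm]
          · simp only [if_neg hm]; exact ih _

lemma pvDa_rev_enum (xs : List Int) (off : Int) (v : Int) :
    (pvDa ((PySem.List.enumerate xs off).reverse) PySem.Dict.empty).get? v
      = (List.findIdx? (· = v) xs).map (fun j => off + (j : Int)) := by
  induction xs generalizing off with
  | nil => simp [PySem.List.enumerate, pvDa]
  | cons b rest ih =>
    rw [PySem.List.enumerate_cons, List.reverse_cons]
    have hda : pvDa ((PySem.List.enumerate rest (off + 1)).reverse ++ [(off, b)]) PySem.Dict.empty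
        = (pvDa ((PySem.List.enumerate rest (off + 1)).reverse) PySem.Dict.empty).insert b off := by
      simp [pvDa, List.foldl_append]
    rw [hda]
    by_cases hv : v = b
    · subst hv
      rw [PySem.Dict.get?_insert_self]
      simp [List.findIdx?_cons]
    · rw [PySem.Dict.get?_insert_of_ne _ off hv, ih]
      rw [List.findIdx?_cons]
      rw [if_neg (by simp; intro h; exact hv h.symm)]
      cases List.findIdx? (· = v) rest <;> (simp; try ring)

lemma pvInnerA_char (b : Int) (rest : List Int) :
    pvInnerA b rest
      = pvDecode (List.findIdx? (· = b) rest) (List.findIdx? (· = (b - 2)) rest)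
          (List.findIdx? (· = (b + 2)) rest) := by
  induction rest with
  | nil => simp [pvInnerA, pvDecode]
  | cons r rs ih =>
    simp only [pvInnerA, List.findIdx?_cons, decide_eq_true_eq]
    by_cases h2 : (b - r).natAbs = 2
    · have hrb : ¬ r = b := by omega
      rw [if_pos h2, if_neg hrb]
      have : r = b - 2 ∨ r = b + 2 := by omega
      rcases this with hr | hr
      · rw [if_pos hr, if_neg (show ¬ r = b + 2 by omega)]
        cases List.findIdx? (· = b) rs <;>
          cases List.findIdx? (· = (b + 2)) rs <;>
            simp [pvDecode]
      · rw [if_neg (show ¬ r = b - 2 by omega), if_pos hr]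
        cases List.findIdx? (· = b) rs <;>
          cases List.findIdx? (· = (b - 2)) rs <;>
            simp [pvDecode]
    · rw [if_neg h2]
      by_cases hrb : r = b
      · rw [if_pos hrb, if_pos hrb]
        rw [if_neg (show ¬ r = b - 2 by omega), if_neg (show ¬ r = b + 2 by omega)]
        cases List.findIdx? (· = (b - 2)) rs <;>
          cases List.findIdx? (· = (b + 2)) rs <;>
            simp [pvDecode]
      · rw [if_neg hrb, if_neg hrb]
        rw [if_neg (show ¬ r = b - 2 by omega), if_neg (show ¬ r = b + 2 by omega), ih]
        cases List.findIdx? (· = b) rs <;>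
          cases List.findIdx? (· = (b - 2)) rs <;>
          cases List.findIdx? (· = (b + 2)) rs <;>
            simp [pvDecode]

-- B's check of one element against the nearest-next-index dict of its tail is A's inner loop
lemma pvGoB_single (b : Int) (off : Int) (rest : List Int) :
    pvGoB [(off, b)] (pvDa ((PySem.List.enumerate rest (off + 1)).reverse) PySem.Dict.empty)
      = !pvInnerA b rest := by
  rw [pvInnerA_char]
  simp only [pvGoB, pvDa_rev_enum]
  cases List.findIdx? (· = b) rest <;>
    cases List.findIdx? (· = (b - 2)) rest <;>
    cases List.findIdx? (· = (b + 2)) rest <;>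
      simp [pvDecode]

lemma pvGoB_eq_A (xs : List Int) (off : Int) :
    pvGoB ((PySem.List.enumerate xs off).reverse) PySem.Dict.empty = is_bounce_seq xs := by
  induction xs generalizing off with
  | nil => simp [PySem.List.enumerate, pvGoB, is_bounce_seq]
  | cons b rest ih =>
    rw [PySem.List.enumerate_cons, List.reverse_cons, pvGoB_append, ih, pvGoB_single]
    simp only [is_bounce_seq]
    cases h1 : pvInnerA b rest <;> cases h2 : is_bounce_seq rest <;> simp

-- ===== VERDICT (by name: the statement is the Claim_ definition above) =====
theorem is_bounce_seq_spec : Claim_equal_is_bounce_seq := by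
  intro seq _
  unfold Spec_is_bounce_seq is_bounce_seq_alt
  rw [pvGoB_eq_A]
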